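-- pv_equiv track=rewrite | github.com/jane886/pragmatic | leetcode/求一个有序数组中绝对值最小的值.py | min_value_of_abs
-- ===== SOURCE A (Python) =====
-- def min_value_of_abs(array):
--     if array[0] >= 0:
--         return array[0]
--
--     if array[-1] <= 0:
--         return array[-1]
--
--     low, high = 0, len(array) - 1
--     while low <= high:
--         mid = (low + high) // 2
--         if array[mid] > 0:
--             if array[mid - 1] < 0:
--                 return array[mid] if abs(array[mid]) < abs(array[mid - 1]) else abs(array[mid - 1])
--             high = mid - 1
--         elif array[mid] < 0:
--             low = mid + 1
--         else:
--             return array[mid]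
--     return None
-- ===== SOURCE B (Python) =====
-- def min_value_of_abs(array):
--     if array[0] >= 0:
--         return array[0]
--     if array[-1] <= 0:
--         return array[-1]
--     return min(abs(x) for x in array)
-- ===== Notes on version B (the rewrite author's own statement) =====
-- stated objective: simpler
-- what changed: The hand-written binary search over the sign change is replaced by a single min(abs(x) for x in array) pass; only the two boundary guards (which return the raw first/last element) are kept.
-- outside the precondition, e.g. on min_value_of_abs([-1, -5, 3]): A returns 3, B returns 1; on min_value_of_abs([]): A raises IndexError, B raises IndexError
import Mathlib
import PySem

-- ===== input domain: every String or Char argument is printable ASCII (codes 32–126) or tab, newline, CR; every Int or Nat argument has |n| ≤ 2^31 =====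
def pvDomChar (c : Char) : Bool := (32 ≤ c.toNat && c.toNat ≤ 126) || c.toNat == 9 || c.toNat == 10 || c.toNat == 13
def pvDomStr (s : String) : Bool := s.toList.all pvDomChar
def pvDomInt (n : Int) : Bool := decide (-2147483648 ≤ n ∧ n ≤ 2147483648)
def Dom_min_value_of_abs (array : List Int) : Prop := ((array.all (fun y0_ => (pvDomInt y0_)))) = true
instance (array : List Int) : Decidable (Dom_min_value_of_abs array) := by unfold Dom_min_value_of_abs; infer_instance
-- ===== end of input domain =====

-- B replaces A's binary search for the sign change by one linear min-of-abs pass, keeping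
-- only the two boundary guards; simpler, not faster (A is O(log n), B is O(n)).

-- ===== PORT A =====
-- the while-loop of A, step for step; state = (low, high)
def minAbsLoop (a : List Int) (low high : Int) : Option Int :=
  if hcond : low ≤ high then
    let mid := PySem.Int.floordiv (low + high) 2
    match PySem.List.pyGet? a mid with
    | none => none                                 -- IndexError (outside Pre_)
    | some v =>
      if v > 0 then
        match PySem.List.pyGet? a (mid - 1) with
        | none => none                             -- IndexError (outside Pre_)
        | some w =>
          if w < 0 then some (if |v| < |w| then v else |w|)
          else minAbsLoop a low (mid - 1)
      else if v < 0 then minAbsLoop a (mid + 1) high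
      else some v
  else none
termination_by (high + 1 - low).toNat
decreasing_by
  · have hb := PySem.Int.floordiv_two_mid_bounds hcond
    omega
  · have hb := PySem.Int.floordiv_two_mid_bounds hcond
    omega

def min_value_of_abs (array : List Int) : Option Int :=
  match PySem.List.pyGet? array 0 with
  | none => none                                   -- IndexError on the empty list (outside Pre_)
  | some a0 =>
    if a0 ≥ 0 then some a0
    else
      match PySem.List.pyGet? array (-1) with
      | none => none
      | some alast =>
        if alast ≤ 0 then some alast
        else minAbsLoop array 0 ((array.length : Int) - 1)

-- ===== PORT B =====
def min_value_of_abs_alt (array : List Int) : Option Int :=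
  match PySem.List.pyGet? array 0 with
  | none => none                                   -- IndexError on the empty list (outside Pre_)
  | some a0 =>
    if a0 ≥ 0 then some a0
    else
      match PySem.List.pyGet? array (-1) with
      | none => none
      | some alast =>
        if alast ≤ 0 then some alast
        else PySem.List.min? (array.map (fun x => |x|)) (fun y => y)

-- ===== PRECONDITION & SPEC =====
-- Pre_ excludes the empty list (A raises IndexError) and unsorted mixed-sign arrays (first
-- element < 0 < last element but not sorted): the function is documented for sorted input, and
-- there A's binary search lands on an accidental local sign change (e.g. [-1, -5, 3] gives 3,
-- not the minimal absolute value 1). Arrays caught by one of the two guards are admitted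
-- whether sorted or not.
def Pre_min_value_of_abs (array : List Int) : Prop :=
  array ≠ [] ∧ (List.Pairwise (· ≤ ·) array ∨ array.headI ≥ 0 ∨ array.getLastI ≤ 0)
instance (array : List Int) : Decidable (Pre_min_value_of_abs array) := by
  unfold Pre_min_value_of_abs; infer_instance

def pvWitness_min_value_of_abs : List Int := [-3, 1, 2]

def Spec_min_value_of_abs (array : List Int) (out : Option Int) : Prop := out = min_value_of_abs_alt array
instance (array : List Int) (out : Option Int) : Decidable (Spec_min_value_of_abs array out) := by unfold Spec_min_value_of_abs; infer_instance

-- ===== CLAIM (what is proved, stated in full; the proofs are below) =====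
def Claim_equal_min_value_of_abs : Prop := ∀ (array : List Int), Dom_min_value_of_abs array → Pre_min_value_of_abs array → Spec_min_value_of_abs array (min_value_of_abs array)

-- ===== LEMMAS AND PROOFS =====

-- a.getD i 0, the in-range reading of a[i] used by the invariants
def gd (a : List Int) (i : Nat) : Int := a.getD i 0

lemma gd_get? (a : List Int) (i : Nat) (h : i < a.length) : a[i]? = some (gd a i) := by
  simp [gd, List.getD_eq_getElem?_getD, List.getElem?_eq_getElem h]

lemma gd_mono (a : List Int) (hs : List.Pairwise (· ≤ ·) a) (i j : Nat)
    (hij : i ≤ j) (hj : j < a.length) : gd a i ≤ gd a j := by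
  rcases Nat.lt_or_ge i j with hlt | hge
  · have := (List.pairwise_iff_getElem.mp hs) i j (by omega) hj hlt
    simpa [gd, List.getD_eq_getElem?_getD, List.getElem?_eq_getElem, hj,
      Nat.lt_of_lt_of_le hlt (Nat.le_of_lt_succ (Nat.lt_succ_of_lt hj))] using this
  · have : i = j := by omega
    subst this; rfl

lemma min?_id_eq_of {l : List Int} {m : Int} (hmem : m ∈ l)
    (hle : ∀ y ∈ l, m ≤ y) : PySem.List.min? l (fun y => y) = some m := by
  have hne : l ≠ [] := by rintro rfl; simp at hmem
  rcases hmin : PySem.List.min? l (fun y => y) with _ | m'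
  · exact absurd ((PySem.List.min?_eq_none_iff l (fun y => y)).mp hmin) hne
  · have h1 : m' ∈ l := PySem.List.min?_mem hmin
    have hge : m' ≤ m := by simpa using PySem.List.min?_isMin hmin m hmem
    rw [le_antisymm hge (hle m' h1)]

lemma mem_map_abs_of_gd (a : List Int) (i : Nat) (h : i < a.length) :
    |gd a i| ∈ a.map (fun x => |x|) := by
  have : gd a i ∈ a := by
    have := gd_get? a i h
    exact List.mem_of_getElem? this
  exact List.mem_map_of_mem this

lemma loop_min (a : List Int)
    (hs : List.Pairwise (· ≤ ·) a)
    (hhead : gd a 0 < 0) :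
    ∀ (low high : Int),
    0 ≤ low → high < (a.length : Int) → low ≤ high →
    (∀ i : Nat, (i : Int) < low → gd a i < 0) →
    (∀ i : Nat, high < (i : Int) → i < a.length → 0 < gd a i) →
    0 ≤ gd a high.toNat →
    minAbsLoop a low high = PySem.List.min? (a.map (fun x => |x|)) (fun y => y) := by
  intro low high
  induction hfuel : (high + 1 - low).toNat using Nat.strong_induction_on generalizing low high with
  | _ fuel ih =>
  intro h0 hh hlh hlow hhigh hah
  have hlen : 0 < a.length := by omega
  obtain ⟨hm1, hm2⟩ := PySem.Int.floordiv_two_mid_bounds hlh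
  set mid := PySem.Int.floordiv (low + high) 2 with hmid
  have hmid0 : 0 ≤ mid := le_trans h0 hm1
  have hmidlen : mid.toNat < a.length := by omega
  have hget : PySem.List.pyGet? a mid = some (gd a mid.toNat) := by
    rw [PySem.List.pyGet?_of_nonneg a hmid0, gd_get? a mid.toNat hmidlen]
  rw [minAbsLoop]
  simp only [hlh, dif_pos, ← hmid, hget]
  set v := gd a mid.toNat with hv
  by_cases hvpos : v > 0
  · -- array[mid] > 0
    have hmid1 : 1 ≤ mid := by
      by_contra hcon
      have : mid = 0 := by omega
      have : v = gd a 0 := by rw [hv, this]; rfl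
      omega
    have hprevlen : (mid - 1).toNat < a.length := by omega
    have hgetp : PySem.List.pyGet? a (mid - 1) = some (gd a (mid - 1).toNat) := by
      rw [PySem.List.pyGet?_of_nonneg a (by omega), gd_get? a (mid - 1).toNat hprevlen]
    simp only [hvpos, if_pos, hgetp]
    set w := gd a (mid - 1).toNat with hw
    by_cases hwneg : w < 0
    · -- crossing found: both return the minimum absolute value
      simp only [hwneg, if_pos]
      have hav : |v| = v := abs_of_pos hvpos
      have haw : |w| = -w := abs_of_neg hwneg
      have hr : (if |v| < |w| then v else |w|) = min |v| |w| := by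
        by_cases hc : |v| < |w| <;> simp [hc] <;> omega
      rw [hr]
      symm
      apply min?_id_eq_of
      · rcases le_total |v| |w| with hc | hc
        · rw [min_eq_left hc]; exact mem_map_abs_of_gd a mid.toNat hmidlen
        · rw [min_eq_right hc]; exact mem_map_abs_of_gd a (mid - 1).toNat hprevlen
      · intro y hy
        obtain ⟨x, hx, rfl⟩ := List.mem_map.mp hy
        obtain ⟨i, hi, rfl⟩ := List.mem_iff_getElem.mp hx
        have hgdi : a[i] = gd a i := by
          have := gd_get? a i hi
          simp [List.getElem?_eq_getElem hi] at this
          exact this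
        rw [hgdi]
        rcases Nat.lt_or_ge i mid.toNat with hcase | hcase
        · -- i ≤ mid - 1 : a[i] ≤ w < 0
          have h1 := gd_mono a hs i (mid - 1).toNat (by omega) hprevlen
          have h2 : |gd a i| = -gd a i := abs_of_neg (by omega)
          omega
        · -- i ≥ mid : a[i] ≥ v > 0
          have h1 := gd_mono a hs mid.toNat i hcase hi
          have h2 : |gd a i| = gd a i := abs_of_pos (by omega)
          omega
    · -- array[mid-1] ≥ 0 : high := mid - 1
      simp only [hwneg, if_false]
      have hlh' : low ≤ mid - 1 := by
        by_contra hcon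
        have := hlow (mid - 1).toNat (by omega)
        omega
      apply ih (mid - 1 + 1 - low).toNat (by omega) low (mid - 1) (by omega) h0 (by omega) hlh' hlow
      · intro i hi hilen
        rcases Nat.lt_or_ge i mid.toNat with hcase | hcase
        · omega
        · have := gd_mono a hs mid.toNat i hcase hilen
          omega
      · omega
  · simp only [hvpos, if_false]
    by_cases hvneg : v < 0
    · -- array[mid] < 0 : low := mid + 1
      simp only [hvneg, if_pos]
      have hmidh : mid < high := by
        by_contra hcon
        have : mid = high := by omega
        have : v = gd a high.toNat := by rw [hv, this]
        omega
      apply ih (high + 1 - (mid + 1)).toNat (by omega) (mid + 1) high (by omega) (by omega) hh (by omega)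
      · intro i hi
        have hile : i ≤ mid.toNat := by omega
        have := gd_mono a hs i mid.toNat hile hmidlen
        omega
      · exact hhigh
      · exact hah
    · -- array[mid] == 0
      have hv0 : v = 0 := by omega
      simp only [hv0, if_neg (by omega : ¬ (0:Int) < 0)]
      symm
      apply min?_id_eq_of
      · have : (0 : Int) = |v| := by rw [hv0, abs_zero]
        rw [this]; exact mem_map_abs_of_gd a mid.toNat hmidlen
      · intro y hy
        obtain ⟨x, hx, rfl⟩ := List.mem_map.mp hy
        exact abs_nonneg x

-- ===== VERDICT (by name: the statement is the Claim_ definition above) =====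
theorem min_value_of_abs_spec : Claim_equal_min_value_of_abs := by
  intro array _ hpre
  obtain ⟨hne, hdisj⟩ := hpre
  unfold Spec_min_value_of_abs min_value_of_abs min_value_of_abs_alt
  obtain ⟨x, t, rfl⟩ := List.exists_cons_of_ne_nil hne
  rw [PySem.List.pyGet?_zero_cons]
  by_cases hx : x ≥ 0
  · simp [hx]
  · simp only [hx, if_false]
    rw [PySem.List.pyGet?_neg_one]
    have hlast : (x :: t).getLast? = some (gd (x :: t) t.length) := by
      have h1 : (x :: t).length - 1 = t.length := by simp
      rw [List.getLast?_eq_getElem?, h1, gd_get? _ _ (by simp)]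
    rw [hlast]
    by_cases hl : gd (x :: t) t.length ≤ 0
    · simp [hl]
    · simp only [hl, if_false]
      have hs : List.Pairwise (· ≤ ·) (x :: t) := by
        rcases hdisj with hs | hh | hg
        · exact hs
        · exact absurd hh (by simpa using hx)
        · rw [List.getLastI_eq_getLast?_getD, hlast] at hg
          exact absurd hg hl
      have hhead : gd (x :: t) 0 < 0 := by
        have : gd (x :: t) 0 = x := rfl
        omega
      have hlen : ((x :: t).length : Int) - 1 = (t.length : Int) := by simp
      rw [hlen]
      apply loop_min (x :: t) hs hhead 0 (t.length : Int)
        (by omega) (by simp) (by omega)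
      · intro i hi; omega
      · intro i hi hilen; simp at hilen; omega
      · simpa using le_of_lt (by omega : (0:Int) < gd (x :: t) t.length)
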